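-- pv_equiv track=rewrite | github.com/UlrichBerntien/Codewars-Katas | 6_kyu/Lets_Recycle.py | recycle
-- ===== SOURCE A (Python) =====
-- def recycle(a):
--     bins = {"paper":[], "glass":[], "organic":[], "plastic":[]}
--     for element in a:
--         name = element.get("type",None)
--         for material in (element.get("material",None), element.get("secondMaterial",None)):
--             if material in bins and name:
--                 bins[material].append(name)
--     return tuple(bins.values())
-- ===== SOURCE B (Python) =====
-- def recycle(a):
--     def bin_for(target):
--         out = []
--         for element in a:
--             name = element.get("type")
--             if name:
--                 if element.get("material") == target:
--                     out.append(name)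
--                 if element.get("secondMaterial") == target:
--                     out.append(name)
--         return out
--     return tuple(bin_for(m) for m in ("paper", "glass", "organic", "plastic"))
-- ===== Notes on version B (the rewrite author's own statement) =====
-- stated objective: alternative
-- what changed: Replaces the single pass that updates a four-bin dict per element with four independent per-material scans of the input, each building one bin list directly.
import Mathlib
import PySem

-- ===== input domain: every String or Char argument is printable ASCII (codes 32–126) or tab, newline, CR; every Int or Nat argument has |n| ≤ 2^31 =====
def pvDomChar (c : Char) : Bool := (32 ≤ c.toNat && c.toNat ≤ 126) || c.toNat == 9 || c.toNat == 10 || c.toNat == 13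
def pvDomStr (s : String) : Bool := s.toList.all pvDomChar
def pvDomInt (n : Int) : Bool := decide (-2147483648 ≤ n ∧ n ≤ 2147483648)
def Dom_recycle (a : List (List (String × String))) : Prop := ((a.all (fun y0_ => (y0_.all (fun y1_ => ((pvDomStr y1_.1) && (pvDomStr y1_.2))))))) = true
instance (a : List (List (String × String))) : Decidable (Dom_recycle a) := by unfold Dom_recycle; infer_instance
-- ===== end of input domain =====

-- B replaces A's single dict-updating pass with four independent per-material scans (alternative decomposition, same cost).


-- ===== PORT A =====
-- 'if material in bins and name' for one candidate material (name truthy = some nonempty string)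
def recycleApply (bins : PySem.Dict String (List String)) (material : Option String)
    (name : Option String) : PySem.Dict String (List String) :=
  match material, name with
  | some m, some n =>
      if bins.contains m && n ≠ "" then bins.modify m [] (· ++ [n]) else bins
  | _, _ => bins

-- body of A's outer loop: one element, two candidate materials in order
def recycleStep (bins : PySem.Dict String (List String)) (element : List (String × String)) :
    PySem.Dict String (List String) :=
  let e := PySem.Dict.mk element
  let name := e.get? "type"
  [e.get? "material", e.get? "secondMaterial"].foldl (fun b m => recycleApply b m name) bins

def recycle (a : List (List (String × String))) : List String × List String × List String × List String :=
  let bins0 : PySem.Dict String (List String) :=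
    PySem.Dict.mk [("paper", []), ("glass", []), ("organic", []), ("plastic", [])]
  let bins := a.foldl recycleStep bins0
  match bins.values with
  | [p, g, o, pl] => (p, g, o, pl)
  | _ => ([], [], [], [])

-- ===== PORT B =====
-- one per-material scan of the whole input (Source B's bin_for)
-- body of bin_for's loop in Source B
def recycleBinStep (target : String) (out : List String) (element : List (String × String)) : List String :=
  let e := PySem.Dict.mk element
  match e.get? "type" with
  | some n =>
      if n ≠ "" then
        (if e.get? "material" = some target then out ++ [n] else out) ++
          (if e.get? "secondMaterial" = some target then [n] else [])
      else out
  | none => out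

def recycleBinFor (a : List (List (String × String))) (target : String) : List String :=
  a.foldl (recycleBinStep target) []

def recycle_alt (a : List (List (String × String))) : List String × List String × List String × List String :=
  (recycleBinFor a "paper", recycleBinFor a "glass", recycleBinFor a "organic", recycleBinFor a "plastic")

-- ===== PRECONDITION & SPEC =====
def Spec_recycle (a : List (List (String × String))) (out : List String × List String × List String × List String) : Prop := out = recycle_alt a
instance (a : List (List (String × String))) (out : List String × List String × List String × List String) : Decidable (Spec_recycle a out) := by unfold Spec_recycle; infer_instance

-- ===== CLAIM (what is proved, stated in full; the proofs are below) =====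
def Claim_equal_recycle : Prop := ∀ (a : List (List (String × String))), Dom_recycle a → Spec_recycle a (recycle a)

-- ===== LEMMAS AND PROOFS =====

-- the four-bin dict with given bin contents
def mk4 (p g o pl : List String) : PySem.Dict String (List String) :=
  PySem.Dict.mk [("paper", p), ("glass", g), ("organic", o), ("plastic", pl)]

-- contribution of one candidate material to one bin
def contrib (material name : Option String) (target : String) : List String :=
  match material, name with
  | some m, some n => if m = target ∧ n ≠ "" then [n] else []
  | _, _ => []

theorem recycleApply_mk4 (p g o pl : List String) (m n : Option String) :
    recycleApply (mk4 p g o pl) m n =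
      mk4 (p ++ contrib m n "paper") (g ++ contrib m n "glass")
        (o ++ contrib m n "organic") (pl ++ contrib m n "plastic") := by
  cases m with
  | none => simp [recycleApply, contrib]
  | some s =>
    cases n with
    | none => simp [recycleApply, contrib]
    | some n =>
      by_cases hn : n = ""
      · simp [recycleApply, contrib, hn]
      · rcases eq_or_ne s "paper" with h | h1 <;>
          [skip; rcases eq_or_ne s "glass" with h | h2] <;>
          [skip; skip; rcases eq_or_ne s "organic" with h | h3] <;>
          [skip; skip; skip; rcases eq_or_ne s "plastic" with h | h4] <;>
        simp_all [recycleApply, contrib, mk4, PySem.Dict.contains, PySem.Dict.modify,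
          PySem.Dict.insert, PySem.Dict.getD, PySem.Dict.get?]
        all_goals rintro (rfl | rfl | rfl | rfl) <;> simp_all

-- per-element contribution to the bin 'target' (both candidate materials, in order)
def cElem (e : List (String × String)) (target : String) : List String :=
  contrib ((PySem.Dict.mk e).get? "material") ((PySem.Dict.mk e).get? "type") target ++
    contrib ((PySem.Dict.mk e).get? "secondMaterial") ((PySem.Dict.mk e).get? "type") target

theorem recycleStep_mk4 (p g o pl : List String) (e : List (String × String)) :
    recycleStep (mk4 p g o pl) e =
      mk4 (p ++ cElem e "paper") (g ++ cElem e "glass") (o ++ cElem e "organic")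
        (pl ++ cElem e "plastic") := by
  simp only [recycleStep, List.foldl, recycleApply_mk4, cElem, List.append_assoc]

theorem recycleBinStep_eq (t : String) (out : List String) (e : List (String × String)) :
    recycleBinStep t out e = out ++ cElem e t := by
  simp only [recycleBinStep, cElem, contrib]
  cases hty : (PySem.Dict.mk e).get? "type" with
  | none => simp
  | some n =>
    cases hm : (PySem.Dict.mk e).get? "material" with
    | none =>
      cases hs : (PySem.Dict.mk e).get? "secondMaterial" with
      | none => by_cases hn : n = "" <;> simp [hn]
      | some s2 => by_cases hn : n = "" <;> split_ifs <;> simp_all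
    | some s1 =>
      cases hs : (PySem.Dict.mk e).get? "secondMaterial" with
      | none => by_cases hn : n = "" <;> split_ifs <;> simp_all
      | some s2 => by_cases hn : n = "" <;> split_ifs <;> simp_all

theorem recycleBinFor_acc (a : List (List (String × String))) :
    ∀ (out : List String) (t : String),
      a.foldl (recycleBinStep t) out = out ++ a.flatMap (fun e => cElem e t) := by
  induction a with
  | nil => simp
  | cons e a ih =>
    intro out t
    simp only [List.foldl_cons, recycleBinStep_eq, ih, List.flatMap_cons, List.append_assoc]

theorem recycleBinFor_eq (a : List (List (String × String))) (t : String) :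
    recycleBinFor a t = a.flatMap (fun e => cElem e t) := by
  unfold recycleBinFor
  rw [recycleBinFor_acc]
  simp

theorem foldl_recycleStep_mk4 (a : List (List (String × String))) :
    ∀ p g o pl, a.foldl recycleStep (mk4 p g o pl) =
      mk4 (p ++ a.flatMap (fun e => cElem e "paper")) (g ++ a.flatMap (fun e => cElem e "glass"))
        (o ++ a.flatMap (fun e => cElem e "organic")) (pl ++ a.flatMap (fun e => cElem e "plastic")) := by
  induction a with
  | nil => simp
  | cons e a ih =>
    intro p g o pl
    simp only [List.foldl_cons, recycleStep_mk4, ih, List.flatMap_cons, List.append_assoc]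

-- ===== VERDICT (by name: the statement is the Claim_ definition above) =====
theorem recycle_spec : Claim_equal_recycle := by
  intro a _
  show recycle a = recycle_alt a
  show (match (List.foldl recycleStep (mk4 [] [] [] []) a).values with
        | [p, g, o, pl] => (p, g, o, pl)
        | _ => ([], [], [], [])) = recycle_alt a
  rw [foldl_recycleStep_mk4]
  simp [mk4, PySem.Dict.values, recycle_alt, recycleBinFor_eq]
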